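-- pv_equiv track=rewrite | github.com/heesankim/Algorithm | 프로그래머스/unrated/181864. 문자열 바꿔서 찾기/문자열 바꿔서 찾기.py | solution
-- ===== SOURCE A (Python) =====
-- def solution(myString, pat):
--     answer = 0
--     result = ""
--     for i in range(len(myString)):
--         if myString[i] == "A":
--             result = result + "B"
--         else:
--             result = result + "A"
--     if result.find(pat) != -1:
--         return 1
--     return answer
-- ===== SOURCE B (Python) =====
-- def solution(myString, pat):
--     # Never builds the swapped string: rejects pats with chars outside 'AB',
--     # then scans myString directly with a swapped per-character comparison.
--     if any(p != 'A' and p != 'B' for p in pat):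
--         return 0
--     m = len(pat)
--     for i in range(len(myString) - m + 1):
--         window = myString[i:i + m]
--         if all((c == 'A') == (p == 'B') for c, p in zip(window, pat)):
--             return 1
--     return 0
-- ===== Notes on version B (the rewrite author's own statement) =====
-- stated objective: faster
-- what changed: B never materialises the swapped string: it rejects patterns containing characters outside 'AB' outright, then slides a window over myString comparing characters through the swap relation directly, instead of A's build-swapped-string-by-repeated-concatenation followed by str.find.
import Mathlib
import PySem

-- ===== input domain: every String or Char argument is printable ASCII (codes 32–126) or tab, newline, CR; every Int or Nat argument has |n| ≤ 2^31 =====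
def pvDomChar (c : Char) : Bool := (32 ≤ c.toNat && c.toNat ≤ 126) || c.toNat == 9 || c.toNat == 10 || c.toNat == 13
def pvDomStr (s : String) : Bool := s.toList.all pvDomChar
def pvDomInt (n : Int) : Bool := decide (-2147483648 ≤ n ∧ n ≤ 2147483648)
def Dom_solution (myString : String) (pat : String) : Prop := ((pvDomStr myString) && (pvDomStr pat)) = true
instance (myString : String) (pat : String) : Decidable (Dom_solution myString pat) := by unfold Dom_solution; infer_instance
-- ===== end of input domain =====

-- B checks pat directly against myString through the swap relation ('A'↦'B', other↦'A') instead of building the swapped string and calling find; equivalence is exact.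

-- ===== PORT A =====
-- strings are handled as their code-point lists; result is built by the same append-per-index loop
def solution (myString : String) (pat : String) : Int :=
  let answer : Int := 0
  let result : List Char :=
    (PySem.List.pyRange 0 (myString.toList.length : Int) 1).foldl
      (fun r i =>
        if PySem.List.pyGet? myString.toList i = some 'A' then r ++ ['B'] else r ++ ['A'])
      []
  if PySem.Chars.find result pat.toList ≠ -1 then 1 else answer

-- ===== PORT B =====
-- Source B's early reject, then the window scan; m = len(pat) inlined
def solution_alt (myString : String) (pat : String) : Int :=
  if pat.toList.any (fun p => p != 'A' && p != 'B') then 0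
  else
    if (PySem.List.pyRange 0 ((myString.toList.length : Int) - (pat.toList.length : Int) + 1) 1).any (fun i =>
        ((PySem.List.slice myString.toList (some i) (some (i + (pat.toList.length : Int)))).zip pat.toList).all
          (fun cp => (cp.1 == 'A') == (cp.2 == 'B')))
    then 1 else 0

-- ===== PRECONDITION & SPEC =====
def Spec_solution (myString : String) (pat : String) (out : Int) : Prop := out = solution_alt myString pat
instance (myString : String) (pat : String) (out : Int) : Decidable (Spec_solution myString pat out) := by unfold Spec_solution; infer_instance

-- ===== CLAIM (what is proved, stated in full; the proofs are below) =====
def Claim_equal_solution : Prop := ∀ (myString : String) (pat : String), Dom_solution myString pat → Spec_solution myString pat (solution myString pat)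

-- ===== LEMMAS AND PROOFS =====

-- the character map A applies: 'A' ↦ 'B', everything else ↦ 'A'
def pvSwap (c : Char) : Char := if c = 'A' then 'B' else 'A'

theorem pvSwap_mem (c : Char) : pvSwap c = 'A' ∨ pvSwap c = 'B' := by
  unfold pvSwap; split <;> simp

-- A's loop builds exactly the swapped string
theorem res_eq (s : List Char) :
    (PySem.List.pyRange 0 (s.length : Int) 1).foldl
      (fun r i => if PySem.List.pyGet? s i = some 'A' then r ++ ['B'] else r ++ ['A']) []
      = s.map pvSwap := by
  have hfun : (fun (r : List Char) (i : Int) => if PySem.List.pyGet? s i = some 'A' then r ++ ['B'] else r ++ ['A'])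
      = fun r i => r ++ [if PySem.List.pyGet? s i = some 'A' then 'B' else 'A'] := by
    funext r i; split <;> rfl
  rw [hfun, PySem.List.foldl_append_singleton_eq_map, PySem.List.pyRange_one, List.map_map]
  apply List.ext_getElem
  · simp
  · intro k h1 h2
    simp only [List.getElem_map]
    have hk : k < s.length := by simpa using h2
    simp [PySem.List.pyGet?_natCast, List.getElem?_eq_getElem hk, pvSwap]

theorem solution_eq_find (s p : String) :
    solution s p =
      if PySem.Chars.find (s.toList.map pvSwap) p.toList ≠ -1 then 1 else 0 := by
  simp only [solution]
  rw [res_eq]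

-- the zip-all window test characterises "the swapped window equals pat"
theorem zipAll_iff (u v : List Char) (hlen : v.length = u.length)
    (hAB : ∀ x ∈ v, x = 'A' ∨ x = 'B') :
    ((u.zip v).all (fun cp => (cp.1 == 'A') == (cp.2 == 'B')) = true) ↔ v = u.map pvSwap := by
  induction u generalizing v with
  | nil =>
    cases v with
    | nil => simp
    | cons p v' => simp at hlen
  | cons c u' ih =>
    cases v with
    | nil => simp at hlen
    | cons p v' =>
      simp only [List.zip_cons_cons, List.all_cons, Bool.and_eq_true, List.map_cons, List.cons.injEq]
      have h1 : ((c == 'A') == (p == 'B')) = true ↔ p = pvSwap c := by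
        rcases hAB p (by simp) with rfl | rfl <;> by_cases hc : c = 'A' <;>
          simp [pvSwap, hc]
      rw [h1, ih v' (by simpa using hlen) (fun x hx => hAB x (by simp [hx]))]

theorem solution_alt_eq_isIn (s p : String) :
    solution_alt s p = if PySem.Chars.isIn p.toList (s.toList.map pvSwap) then 1 else 0 := by
  unfold solution_alt
  by_cases hg : p.toList.any (fun x => x != 'A' && x != 'B') = true
  · rw [if_pos hg]
    obtain ⟨x, hxq, hx⟩ := List.any_eq_true.1 hg
    have hx' : x ≠ 'A' ∧ x ≠ 'B' := by simpa using hx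
    have hnotin : PySem.Chars.isIn p.toList (s.toList.map pvSwap) = false := by
      apply (PySem.Chars.isIn_eq_false_iff _ _).2
      intro hinf
      have hxt : x ∈ s.toList.map pvSwap := hinf.subset hxq
      obtain ⟨c, _, hc⟩ := List.mem_map.1 hxt
      rcases pvSwap_mem c with h | h <;> rw [hc] at h <;> [exact hx'.1 h; exact hx'.2 h]
    simp [hnotin]
  · rw [if_neg hg]
    have hAB : ∀ x ∈ p.toList, x = 'A' ∨ x = 'B' := by
      intro x hx
      have := List.any_eq_false.1 (Bool.eq_false_iff.2 hg) x hx
      by_cases h1 : x = 'A'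
      · exact Or.inl h1
      · right; by_contra h2; simp [h1, h2] at this
    have hkey : (PySem.List.pyRange 0 ((s.toList.length : Int) - (p.toList.length : Int) + 1) 1).any (fun i =>
        ((PySem.List.slice s.toList (some i) (some (i + (p.toList.length : Int)))).zip p.toList).all
          (fun cp => (cp.1 == 'A') == (cp.2 == 'B')))
        = PySem.Chars.isIn p.toList (s.toList.map pvSwap) := by
      set l := s.toList with hl
      set q := p.toList with hq
      set n := l.length with hn
      set m := q.length with hm
      rw [Bool.eq_iff_iff, List.any_eq_true, ← PySem.Chars.exists_prefix_drop_iff_isIn]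
      constructor
      · rintro ⟨i, hi, hall⟩
        obtain ⟨hi0, hilt⟩ := (PySem.List.mem_pyRange_one).1 hi
        have hk : i.toNat + m ≤ n := by omega
        have hslice : PySem.List.slice l (some i) (some (i + (m : Int))) = (l.drop i.toNat).take m := by
          rw [PySem.List.slice_toNat _ hi0 (by omega)]
          congr 1
          omega
        rw [hslice] at hall
        have hwlen : q.length = ((l.drop i.toNat).take m).length := by
          simp [hm]; omega
        have := (zipAll_iff _ _ hwlen hAB).1 hall
        refine ⟨i.toNat, ?_⟩
        rw [this, List.map_take, List.map_drop]
        exact List.take_prefix _ _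
      · rintro ⟨j, hpre⟩
        by_cases hq0 : q = []
        · refine ⟨0, ?_, ?_⟩
          · rw [PySem.List.mem_pyRange_one]
            refine ⟨le_refl 0, by simp [hq0, hm]⟩
          · simp [hq0]
        · have hjn : j < n := by
            by_contra hge
            have hnil : (l.map pvSwap).drop j = [] := by
              apply List.drop_eq_nil_of_le
              simp only [List.length_map]
              omega
            rw [hnil] at hpre
            exact hq0 (List.prefix_nil.1 hpre)
          have hmn : m ≤ (l.map pvSwap).length - j := by
            have := hpre.length_le
            simpa [hm] using this
          have hjm : j + m ≤ n := by
            have hln : (l.map pvSwap).length = n := by simp [hn]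
            omega
          refine ⟨(j : Int), ?_, ?_⟩
          · rw [PySem.List.mem_pyRange_one]
            refine ⟨by omega, by omega⟩
          · have hslice : PySem.List.slice l (some (j:Int)) (some ((j:Int) + (m : Int))) = (l.drop j).take m := by
              rw [PySem.List.slice_toNat _ (by omega) (by omega)]
              congr 1
              omega
            rw [hslice]
            have hwlen : q.length = ((l.drop j).take m).length := by
              simp [hm]; omega
            apply (zipAll_iff _ _ hwlen hAB).2
            have hq_take : q = ((l.map pvSwap).drop j).take m := by
              have := List.prefix_iff_eq_take.1 hpre
              rw [this, hm]
            rw [hq_take, List.map_take, List.map_drop]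
    rw [hkey]

-- ===== VERDICT (by name: the statement is the Claim_ definition above) =====
theorem solution_spec : Claim_equal_solution := by
  intro s p _
  unfold Spec_solution
  rw [solution_eq_find, solution_alt_eq_isIn]
  by_cases h : p.toList <:+: s.toList.map pvSwap
  · rw [if_pos, if_pos ((PySem.Chars.isIn_iff_infix _ _).2 h)]
    exact (PySem.Chars.find_ne_neg_one_iff _ _).2 h
  · rw [if_neg, if_neg]
    · simp [(PySem.Chars.isIn_eq_false_iff _ _).2 h]
    · simpa using (PySem.Chars.find_eq_neg_one_iff _ _).2 h
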